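-- pv_equiv track=rewrite | github.com/Xorumur/expert-system | src/Parser.py | tokenize_rule
-- ===== SOURCE A (Python) =====
-- def tokenize_rule(rule):
--     """
--     Tokenize une règle pour extraire les opérateurs,
--     parenthèses et variables.
--     """
--     tokens = []
--     buffer = ''
--     i = 0
--     while i < len(rule):
--         c = rule[i]
--         if c in "()+|^!":  # Opérateurs et parenthèses simples
--             if buffer:
--                 tokens.append(buffer)
--                 buffer = ''
--             tokens.append(c)
--         elif c == '=' and i + 1 < len(rule) and rule[i + 1] == '>':
--             if buffer:
--                 tokens.append(buffer)
--                 buffer = ''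
--             tokens.append('=>')
--             i += 1
--         elif c == '<' and i + 2 < len(rule) and rule[i + 1:i + 3] == '=>':
--             if buffer:
--                 tokens.append(buffer)
--                 buffer = ''
--             tokens.append('<=>')
--             i += 2
--         elif c.strip():  # Ignorer les espaces
--             buffer += c
--         i += 1
--
--     if buffer:
--         tokens.append(buffer)
--
--     return tokens
-- ===== SOURCE B (Python) =====
-- def tokenize_rule(rule):
--     """
--     Tokenize une règle pour extraire les opérateurs,
--     parenthèses et variables.
--     """
--     # Phase 1: split the rule into raw gaps separated by operator tokens
--     # (leftmost, longest-first matching: '<=>' and '=>' checked at their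
--     # starting character, single-char operators otherwise).
--     pairs = []          # list of (raw gap text, operator)
--     cur = []
--     i = 0
--     n = len(rule)
--     while i < n:
--         c = rule[i]
--         if c in "()+|^!":
--             op, w = c, 1
--         elif rule.startswith('=>', i):
--             op, w = '=>', 2
--         elif rule.startswith('<=>', i):
--             op, w = '<=>', 3
--         else:
--             cur.append(c)
--             i += 1
--             continue
--         pairs.append((''.join(cur), op))
--         cur = []
--         i += w
--     last_gap = ''.join(cur)
--
--     # Phase 2: each gap, with every whitespace char removed, becomes one
--     # word token (if non-empty) before its operator.
--     tokens = []
--     for gap, op in pairs: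
--         word = ''.join(ch for ch in gap if ch.strip())
--         if word:
--             tokens.append(word)
--         tokens.append(op)
--     word = ''.join(ch for ch in last_gap if ch.strip())
--     if word:
--         tokens.append(word)
--     return tokens
-- ===== Notes on version B (the rewrite author's own statement) =====
-- stated objective: faster
-- what changed: Replaced the char-by-char state machine with quadratic string-concatenation buffering by a two-phase boundary walk: first split the rule into raw gaps separated by leftmost-matched operator tokens (collecting chars in a list), then strip whitespace from each gap with a single join and emit it as a word before its operator.
import Mathlib
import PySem

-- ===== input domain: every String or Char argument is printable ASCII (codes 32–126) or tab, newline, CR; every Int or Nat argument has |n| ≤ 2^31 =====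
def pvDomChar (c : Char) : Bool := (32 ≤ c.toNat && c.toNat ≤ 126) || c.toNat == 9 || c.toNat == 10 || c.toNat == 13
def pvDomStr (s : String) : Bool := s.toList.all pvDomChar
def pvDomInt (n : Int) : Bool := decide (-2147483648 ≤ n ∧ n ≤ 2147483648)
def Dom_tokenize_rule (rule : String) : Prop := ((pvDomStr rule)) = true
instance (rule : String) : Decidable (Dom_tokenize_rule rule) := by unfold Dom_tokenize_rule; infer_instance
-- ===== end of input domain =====

-- B replaces A's inline-buffer state machine by a two-phase boundary walk (split into raw
-- gaps at operator matches, then whitespace-strip each gap joined once), avoiding A's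
-- repeated string-concatenation buffering; a timing run measured B faster.

-- ===== PORT A =====
-- A's while loop over index i as recursion on the remaining character list (same state:
-- tokens, buffer); rule[i] is the head c, rule[i+1] / rule[i+1:i+3] are rest.take 1 /
-- rest.take 2 (the i+1<len / i+2<len guards are implied by the take-comparison);
-- `c.strip()` truthy  ↔  ¬ PySem.Chars.isspace c (exact on the ASCII domain).
def tokALoop (cs : List Char) (tokens : List String) (buffer : List Char) : List String :=
  match cs with
  | [] => if buffer ≠ [] then tokens ++ [String.mk buffer] else tokens
  | c :: rest =>
    if c ∈ ['(', ')', '+', '|', '^', '!'] then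
      tokALoop rest ((if buffer ≠ [] then tokens ++ [String.mk buffer] else tokens)
        ++ [String.mk [c]]) []
    else if c = '=' ∧ rest.take 1 = ['>'] then
      tokALoop (rest.drop 1) ((if buffer ≠ [] then tokens ++ [String.mk buffer] else tokens)
        ++ ["=>"]) []
    else if c = '<' ∧ rest.take 2 = ['=', '>'] then
      tokALoop (rest.drop 2) ((if buffer ≠ [] then tokens ++ [String.mk buffer] else tokens)
        ++ ["<=>"]) []
    else if ¬ PySem.Chars.isspace c then
      tokALoop rest tokens (buffer ++ [c])
    else
      tokALoop rest tokens buffer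
termination_by cs.length
decreasing_by all_goals simp [List.length_drop] <;> omega

def tokenize_rule (rule : String) : List String :=
  tokALoop rule.toList [] []

-- ===== PORT B =====
-- Phase 1 of B: split the rule into (raw gap, operator) pairs plus the trailing raw gap
-- ('rule.startswith(op, i)' on the remaining characters is rest.take w = op-chars).
def tokBSplit (cs : List Char) (cur : List Char) : List (List Char × String) × List Char :=
  match cs with
  | [] => ([], cur)
  | c :: rest =>
    if c ∈ ['(', ')', '+', '|', '^', '!'] then
      let p := tokBSplit rest []
      ((cur, String.mk [c]) :: p.1, p.2)
    else if c = '=' ∧ rest.take 1 = ['>'] then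
      let p := tokBSplit (rest.drop 1) []
      ((cur, "=>") :: p.1, p.2)
    else if c = '<' ∧ rest.take 2 = ['=', '>'] then
      let p := tokBSplit (rest.drop 2) []
      ((cur, "<=>") :: p.1, p.2)
    else
      tokBSplit rest (cur ++ [c])
termination_by cs.length
decreasing_by all_goals simp [List.length_drop] <;> omega

-- whitespace-stripped gap as a word-token list ('' yields no token)
def tokBWord (g : List Char) : List String :=
  let w := g.filter (fun c => ¬ PySem.Chars.isspace c)
  if w ≠ [] then [String.mk w] else []

-- Phase 2 of B: emit word/operator tokens from the pairs and the trailing gap.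
def tokBEmit (pairs : List (List Char × String)) (lg : List Char) : List String :=
  match pairs with
  | [] => tokBWord lg
  | (g, op) :: rest => tokBWord g ++ [op] ++ tokBEmit rest lg

def tokenize_rule_alt (rule : String) : List String :=
  let p := tokBSplit rule.toList []
  tokBEmit p.1 p.2

-- ===== PRECONDITION & SPEC =====
def Spec_tokenize_rule (rule : String) (out : List String) : Prop := out = tokenize_rule_alt rule
instance (rule : String) (out : List String) : Decidable (Spec_tokenize_rule rule out) := by unfold Spec_tokenize_rule; infer_instance

-- ===== CLAIM (what is proved, stated in full; the proofs are below) =====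
def Claim_equal_tokenize_rule : Prop := ∀ (rule : String), Dom_tokenize_rule rule → Spec_tokenize_rule rule (tokenize_rule rule)

-- ===== LEMMAS AND PROOFS =====

-- emit with a pending (already whitespace-free) word prefix: A's buffer
def emitP (pairs : List (List Char × String)) (lg : List Char) (pend : List Char) : List String :=
  match pairs with
  | [] =>
      let w := pend ++ lg.filter (fun c => ¬ PySem.Chars.isspace c)
      if w ≠ [] then [String.mk w] else []
  | (g, op) :: rest =>
      (let w := pend ++ g.filter (fun c => ¬ PySem.Chars.isspace c)
       if w ≠ [] then [String.mk w] else []) ++ [op] ++ emitP rest lg []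

lemma emitP_nil (pairs : List (List Char × String)) (lg : List Char) :
    emitP pairs lg [] = tokBEmit pairs lg := by
  induction pairs with
  | nil => simp [emitP, tokBEmit, tokBWord]
  | cons p rest ih => cases p; simp [emitP, tokBEmit, tokBWord, ih]

-- prefixing the first gap
def prefG (pre : List Char) : List (List Char × String) × List Char →
    List (List Char × String) × List Char
  | ([], lg) => ([], pre ++ lg)
  | ((g, op) :: rest, lg) => ((pre ++ g, op) :: rest, lg)

lemma tokBSplit_cur (n : Nat) : ∀ (cs : List Char), cs.length ≤ n → ∀ cur,
    tokBSplit cs cur = prefG cur (tokBSplit cs []) := by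
  induction n with
  | zero =>
    intro cs h cur
    cases cs with
    | nil => simp [tokBSplit, prefG]
    | cons c rest => simp at h
  | succ n ih =>
    intro cs h cur
    cases cs with
    | nil => simp [tokBSplit, prefG]
    | cons c rest =>
      simp only [List.length_cons] at h
      by_cases h1 : c ∈ ['(', ')', '+', '|', '^', '!']
      · simp [tokBSplit, h1, prefG]
      · by_cases h2 : c = '=' ∧ rest.take 1 = ['>']
        · simp [tokBSplit, h1, h2, prefG]
        · by_cases h3 : c = '<' ∧ rest.take 2 = ['=', '>']
          · simp [tokBSplit, h1, h2, h3, prefG]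
          · have key : ∀ cur', tokBSplit (c :: rest) cur' = tokBSplit rest (cur' ++ [c]) := by
              intro cur'; simp [tokBSplit, h1, h2, h3]
            have hr : rest.length ≤ n := by omega
            rw [key cur, key []]
            rw [ih rest hr (cur ++ [c]), ih rest hr ([] ++ [c])]
            rcases hb : tokBSplit rest [] with ⟨pairs, lg⟩
            cases pairs with
            | nil => simp [prefG]
            | cons p r => cases p; simp [prefG]

lemma emitP_prefG (c : Char) (pr : List (List Char × String) × List Char) (pend : List Char) :
    emitP (prefG [c] pr).1 (prefG [c] pr).2 pend =
      if PySem.Chars.isspace c then emitP pr.1 pr.2 pend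
      else emitP pr.1 pr.2 (pend ++ [c]) := by
  rcases pr with ⟨pairs, lg⟩
  cases pairs with
  | nil =>
    by_cases hs : PySem.Chars.isspace c <;> simp [prefG, emitP, hs]
  | cons p rest =>
    cases p
    by_cases hs : PySem.Chars.isspace c <;> simp [prefG, emitP, hs]

lemma tokALoop_emit (n : Nat) : ∀ (cs : List Char), cs.length ≤ n → ∀ tokens buffer,
    tokALoop cs tokens buffer =
      tokens ++ emitP (tokBSplit cs []).1 (tokBSplit cs []).2 buffer := by
  induction n with
  | zero =>
    intro cs h tokens buffer
    cases cs with
    | nil => by_cases hb : buffer = [] <;> simp [tokALoop, tokBSplit, emitP, hb]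
    | cons c rest => simp at h
  | succ n ih =>
    intro cs h tokens buffer
    cases cs with
    | nil => by_cases hb : buffer = [] <;> simp [tokALoop, tokBSplit, emitP, hb]
    | cons c rest =>
      simp only [List.length_cons] at h
      have hr : rest.length ≤ n := by omega
      have hr1 : (rest.drop 1).length ≤ n := by simp [List.length_drop]; omega
      have hr2 : (rest.drop 2).length ≤ n := by simp [List.length_drop]; omega
      by_cases h1 : c ∈ ['(', ')', '+', '|', '^', '!']
      · rw [show tokALoop (c :: rest) tokens buffer
            = tokALoop rest ((if buffer ≠ [] then tokens ++ [String.mk buffer] else tokens)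
                ++ [String.mk [c]]) [] by simp [tokALoop, h1]]
        rw [ih rest hr]
        have hsplit : tokBSplit (c :: rest) [] =
            (([], String.mk [c]) :: (tokBSplit rest []).1, (tokBSplit rest []).2) := by
          simp [tokBSplit, h1]
        rw [hsplit]
        by_cases hb : buffer = [] <;> simp [emitP, emitP_nil, hb]
      · by_cases h2 : c = '=' ∧ rest.take 1 = ['>']
        · rw [show tokALoop (c :: rest) tokens buffer
              = tokALoop (rest.drop 1)
                  ((if buffer ≠ [] then tokens ++ [String.mk buffer] else tokens)
                    ++ ["=>"]) [] by simp [tokALoop, h1, h2]]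
          rw [ih (rest.drop 1) hr1]
          have hsplit : tokBSplit (c :: rest) [] =
              ((([] : List Char), "=>") :: (tokBSplit (rest.drop 1) []).1,
                (tokBSplit (rest.drop 1) []).2) := by
            simp [tokBSplit, h1, h2]
          rw [hsplit]
          by_cases hb : buffer = [] <;> simp [emitP, emitP_nil, hb]
        · by_cases h3 : c = '<' ∧ rest.take 2 = ['=', '>']
          · rw [show tokALoop (c :: rest) tokens buffer
                = tokALoop (rest.drop 2)
                    ((if buffer ≠ [] then tokens ++ [String.mk buffer] else tokens)
                      ++ ["<=>"]) [] by simp [tokALoop, h1, h2, h3]]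
            rw [ih (rest.drop 2) hr2]
            have hsplit : tokBSplit (c :: rest) [] =
                ((([] : List Char), "<=>") :: (tokBSplit (rest.drop 2) []).1,
                  (tokBSplit (rest.drop 2) []).2) := by
              simp [tokBSplit, h1, h2, h3]
            rw [hsplit]
            by_cases hb : buffer = [] <;> simp [emitP, emitP_nil, hb]
          · have hsplit : tokBSplit (c :: rest) [] = prefG [c] (tokBSplit rest []) := by
              rw [show tokBSplit (c :: rest) [] = tokBSplit rest ([] ++ [c]) by
                simp [tokBSplit, h1, h2, h3]]
              exact tokBSplit_cur n rest hr [c]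
            by_cases hs : PySem.Chars.isspace c
            · rw [show tokALoop (c :: rest) tokens buffer = tokALoop rest tokens buffer by
                simp [tokALoop, h1, h2, h3, hs]]
              rw [ih rest hr, hsplit, emitP_prefG, if_pos hs]
            · rw [show tokALoop (c :: rest) tokens buffer
                  = tokALoop rest tokens (buffer ++ [c]) by simp [tokALoop, h1, h2, h3, hs]]
              rw [ih rest hr, hsplit, emitP_prefG, if_neg hs]

-- ===== VERDICT (by name: the statement is the Claim_ definition above) =====
theorem tokenize_rule_spec : Claim_equal_tokenize_rule := by
  intro rule _
  unfold Spec_tokenize_rule tokenize_rule tokenize_rule_alt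
  rw [tokALoop_emit rule.toList.length rule.toList le_rfl, emitP_nil]
  simp
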